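-- pv_equiv track=rewrite | github.com/andela-angene/Algorithmic-Problem-Solving | Hackerrank/algorithms - practice/implementation/icm-icpc-team.py | max_team
-- ===== SOURCE A (Python) =====
-- from collections import defaultdict
--
-- def max_team(course):
--     n, m = len(course), len(course[0])
--     table, max_num = defaultdict(int), 0
--
--     for i in range(n):
--         i_course = course[i]
--         for j in range(i + 1, n):
--             j_course, total = course[j], 0
--             for z in range(m):
--                 if i_course[z] == '1' or j_course[z] == '1':
--                     total += 1
--             table[total] += 1
--             max_num = max(total, max_num)
--
--     return max_num, table[max_num]
-- ===== SOURCE B (Python) =====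
-- def max_team(course):
--     m = len(course[0])
--     best, ways = 0, 0
--     seen = {}
--     for s in course:
--         x = sum(1 << z for z in range(m) if s[z] == '1')
--         for a, k in seen.items():
--             p = bin(x | a).count('1')
--             if p > best:
--                 best, ways = p, k
--             elif p == best:
--                 ways += k
--         seen[x] = seen.get(x, 0) + 1
--     return best, ways
-- ===== Notes on version B (the rewrite author's own statement) =====
-- stated objective: faster
-- what changed: B makes one pass over the rows maintaining a Counter of previously seen bitmasks and a running (best, ways) accumulator: each new row is paired only against DISTINCT previous masks weighted by multiplicity, so A's inner scan over all rows and its histogram dict + final lookup disappear.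
-- outside the precondition, e.g. on max_team(['1', '']): A returns (1, 1), B raises IndexError; on max_team([]): A raises IndexError, B raises IndexError
import Mathlib
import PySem

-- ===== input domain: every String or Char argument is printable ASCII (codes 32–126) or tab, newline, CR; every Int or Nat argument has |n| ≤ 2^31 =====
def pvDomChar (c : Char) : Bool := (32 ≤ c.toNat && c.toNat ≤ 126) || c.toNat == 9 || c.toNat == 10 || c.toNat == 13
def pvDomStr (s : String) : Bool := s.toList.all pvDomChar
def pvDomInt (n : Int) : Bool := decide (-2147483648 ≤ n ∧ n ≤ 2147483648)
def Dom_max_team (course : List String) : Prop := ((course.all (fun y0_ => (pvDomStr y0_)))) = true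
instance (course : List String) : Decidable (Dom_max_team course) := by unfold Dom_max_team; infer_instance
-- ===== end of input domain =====

-- B replaces A's nested row-pair scan + histogram dict with one pass keeping a Counter of previously
-- seen row bitmasks and a running (best, ways) accumulator over distinct previous masks (objective: faster).


-- ===== PORT A =====
def max_team (course : List String) : Int × Int :=
  let n : Int := PySem.List.len course
  let m : Int := PySem.Str.len (PySem.List.pyGetD course 0 "")
  let st : PySem.Dict Int Int × Int :=
    (PySem.List.pyRange 0 n).foldl (fun st i =>
      let i_course := PySem.List.pyGetD course i ""
      (PySem.List.pyRange (i + 1) n).foldl (fun st j =>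
        let j_course := PySem.List.pyGetD course j ""
        let total : Int :=
          (PySem.List.pyRange 0 m).foldl (fun total z =>
            if PySem.Str.pyGet? i_course z = some '1' ∨ PySem.Str.pyGet? j_course z = some '1'
            then total + 1 else total) 0
        (st.1.modify total 0 (· + 1), max total st.2)) st)
      (PySem.Dict.empty, 0)
  (st.2, st.1.getD st.2 0)

-- ===== PORT B =====
-- 'bin(x | a).count('1')' is PySem.Int.bitCount (exact here: both masks are nonnegative).
def max_team_alt (course : List String) : Int × Int :=
  let m : Int := PySem.Str.len (PySem.List.pyGetD course 0 "")
  let st : Int × Int × PySem.Dict Int Int :=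
    course.foldl (fun st s =>
      let x : Int :=
        (PySem.List.pyRange 0 m).foldl (fun acc z =>
          if PySem.Str.pyGet? s z = some '1' then acc + ((1 <<< z.toNat : Nat) : Int) else acc) 0
      let bw : Int × Int :=
        st.2.2.items.foldl (fun bw ak =>
          let p : Int := ((PySem.Int.bitCount (PySem.Int.bor x ak.1) : Nat) : Int)
          if bw.1 < p then (p, ak.2)
          else if p = bw.1 then (bw.1, bw.2 + ak.2) else bw)
          (st.1, st.2.1)
      (bw.1, bw.2, st.2.2.modify x 0 (· + 1)))
      (0, 0, PySem.Dict.empty)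
  (st.1, st.2.1)

-- ===== PRECONDITION & SPEC =====
-- Pre_ excludes the empty list (A raises IndexError on course[0]) and ragged inputs where some row is
-- shorter than the first row: there B's eager mask computation raises IndexError while A sometimes
-- returns thanks to the short-circuit 'or' (and otherwise raises too).
def Pre_max_team (course : List String) : Prop :=
  course ≠ [] ∧ ∀ s ∈ course, (course.headD "").toList.length ≤ s.toList.length
instance (course : List String) : Decidable (Pre_max_team course) := by unfold Pre_max_team; infer_instance
def pvWitness_max_team : List String := ["110", "011", "110"]

def Spec_max_team (course : List String) (out : Int × Int) : Prop := out = max_team_alt course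
instance (course : List String) (out : Int × Int) : Decidable (Spec_max_team course out) := by unfold Spec_max_team; infer_instance

-- ===== CLAIM (what is proved, stated in full; the proofs are below) =====
def Claim_equal_max_team : Prop := ∀ (course : List String), Dom_max_team course → Pre_max_team course → Spec_max_team course (max_team course)

-- ===== LEMMAS AND PROOFS =====

/-- popcount of the union, as an Int (proof-side abbreviation). -/
def pvP (a b : Int) : Int := ((PySem.Int.bitCount (PySem.Int.bor a b) : Nat) : Int)

/-- The bitmask of a row as a prefix-slice helper (proof-side reference, mirrors enumerate/sum). -/
def pvMask (m : Int) (s : String) : Int :=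
  (((PySem.List.enumerate (PySem.List.slice s.toList none (some m))).filter
      (fun p => p.2 == '1')).map (fun p => ((1 <<< p.1.toNat : Nat) : Int))).sum

/-- Reference form of the answer: the flat list of pairwise union popcounts, then max / count.
    (Proof-side only; the bridge between the two ports.) -/
def pvRef (course : List String) : Int × Int :=
  let m : Int := PySem.Str.len (PySem.List.pyGetD course 0 "")
  let masks : List Int := course.map (fun s => pvMask m s)
  let totals : List Int :=
    (PySem.List.enumerate masks).flatMap (fun p =>
      (PySem.List.slice masks (some (p.1 + 1)) none).map
        (fun b => (PySem.Int.bitCount (PySem.Int.bor p.2 b) : Int)))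
  let best : Int := PySem.List.maxD totals (fun x => x) 0
  (best, (PySem.List.count totals best : Int))

/-- Nat popcount, binary recursion (proof-side mirror of `PySem.Int.bitCount` on casts). -/
def pvPop (n : Nat) : Nat :=
  if h : n = 0 then 0 else n % 2 + pvPop (n / 2)
decreasing_by exact Nat.div_lt_self (Nat.pos_of_ne_zero h) one_lt_two

/-- The bitmask of a row, as a structural recursion over its characters (low bit first). -/
def pvMrec : List Char → Nat
  | [] => 0
  | c :: cs => Nat.bit (c == '1') (pvMrec cs)

theorem pvBitCount_cast (n : Nat) : PySem.Int.bitCount (n : Int) = pvPop n := by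
  induction n using Nat.strong_induction_on with
  | _ n ih =>
    rcases Nat.eq_zero_or_pos n with h | h
    · subst h; simp [pvPop, PySem.Int.bitCount_zero]
    · rw [PySem.Int.bitCount_natCast (m := n) h, pvPop, dif_neg (Nat.pos_iff_ne_zero.mp h),
        ih (n / 2) (Nat.div_lt_self h one_lt_two)]

theorem pvBit_or_bit (b b' : Bool) (x y : Nat) :
    Nat.bit b x ||| Nat.bit b' y = Nat.bit (b || b') (x ||| y) := by
  apply Nat.eq_of_testBit_eq
  intro i
  cases i with
  | zero => simp
  | succ i => simp [Nat.testBit_or, Nat.testBit_bit_succ]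

theorem pvPop_bit (b : Bool) (n : Nat) : pvPop (Nat.bit b n) = b.toNat + pvPop n := by
  rcases Nat.eq_zero_or_pos (Nat.bit b n) with h | h
  · rcases Nat.bit_eq_zero_iff.mp h with ⟨hn, hb⟩
    simp [hn, hb, pvPop]
  · rw [pvPop, dif_neg (Nat.pos_iff_ne_zero.mp h), Nat.bit_mod_two, Nat.bit_div_two]

theorem pvPop_or_count (cs : List Char) : ∀ ds : List Char, cs.length = ds.length →
    pvPop (pvMrec cs ||| pvMrec ds) =
      (cs.zip ds).countP (fun p => p.1 == '1' || p.2 == '1') := by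
  induction cs with
  | nil => intro ds h; simp only [List.length_nil] at h; rw [eq_comm, List.length_eq_zero_iff] at h; subst h; simp [pvMrec, pvPop]
  | cons c cs ih =>
    intro ds h
    cases ds with
    | nil => simp at h
    | cons d ds =>
      simp only [List.length_cons, Nat.add_right_cancel_iff] at h
      simp only [pvMrec, pvBit_or_bit, pvPop_bit, List.zip_cons_cons, List.countP_cons,
        ih ds h]
      cases hc : (c == '1') <;> cases hd : (d == '1') <;> simp [Bool.toNat] <;> omega

theorem pvMask_sum (cs : List Char) : ∀ k : Nat,
    ((((PySem.List.enumerate cs (k : Int)).filter (fun p => p.2 == '1')).map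
        (fun p => ((1 <<< p.1.toNat : Nat) : Int))).sum) = (2 : Int) ^ k * (pvMrec cs : Int) := by
  induction cs with
  | nil => intro k; simp [PySem.List.enumerate, pvMrec]
  | cons c cs ih =>
    intro k
    have hcons : PySem.List.enumerate (c :: cs) (k : Int)
        = ((k : Int), c) :: PySem.List.enumerate cs ((k : Int) + 1) := rfl
    have hk1 : ((k : Int) + 1) = (((k + 1 : Nat) : Int)) := by push_cast; ring
    rw [hcons, hk1]
    have hbit : ((pvMrec (c :: cs) : Nat) : Int)
        = 2 * (pvMrec cs : Int) + (((c == '1') : Bool).toNat : Int) := by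
      cases hcb : (c == '1') <;>
        simp only [pvMrec, Nat.bit, hcb, cond_false, cond_true,
          Bool.toNat_false, Bool.toNat_true] <;> push_cast <;> ring
    cases hc : (c == '1') with
    | false =>
      rw [List.filter_cons_of_neg (by simp [hc]), ih (k + 1), hbit, hc]
      push_cast [Bool.toNat_false]; ring
    | true =>
      rw [List.filter_cons_of_pos (by simp [hc]), List.map_cons, List.sum_cons,
        ih (k + 1), hbit, hc]
      have hfst : (((k : Int), c)).1 = (k : Int) := rfl
      rw [hfst]
      have h1k : (((1 <<< ((k : Int)).toNat : Nat)) : Int) = 2 ^ k := by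
        simp [Nat.shiftLeft_eq]
      rw [h1k]; push_cast [Bool.toNat_true]; ring

theorem pvMask_eq (m0 : Nat) (s : String) :
    pvMask (m0 : Int) s = ((pvMrec (s.toList.take m0) : Nat) : Int) := by
  unfold pvMask
  rw [PySem.List.slice_to_natCast]
  have h0 : ((0 : Nat) : Int) = (0 : Int) := by norm_num
  have := pvMask_sum (s.toList.take m0) 0
  rw [h0] at this
  rw [this]
  simp

theorem pvInner_count (cs ds : List Char) (m0 : Nat) (h1 : m0 ≤ cs.length) (h2 : m0 ≤ ds.length) :
    (PySem.List.pyRange 0 (m0 : Int)).foldl (fun total z =>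
        if PySem.List.pyGet? cs z = some '1' ∨ PySem.List.pyGet? ds z = some '1'
        then total + 1 else total) (0 : Int)
      = (((cs.take m0).zip (ds.take m0)).countP (fun p => p.1 == '1' || p.2 == '1') : Int) := by
  have hbody : (fun (total : Int) (z : Int) =>
      if PySem.List.pyGet? cs z = some '1' ∨ PySem.List.pyGet? ds z = some '1'
      then total + 1 else total)
      = (fun (total : Int) (z : Int) =>
        if ((decide (PySem.List.pyGet? cs z = some '1')
            || decide (PySem.List.pyGet? ds z = some '1')) : Bool) = true
        then total + 1 else total) := by
    funext t z
    by_cases h : PySem.List.pyGet? cs z = some '1' ∨ PySem.List.pyGet? ds z = some '1'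
    · rw [if_pos h, if_pos (by simpa using h)]
    · rw [if_neg h, if_neg (by simpa using h)]
  rw [hbody, PySem.List.foldl_count_if, zero_add]
  congr 1
  rw [PySem.List.pyRange_zero_nat, List.countP_map]
  induction m0 with
  | zero => simp
  | succ m ih =>
    have hm1 : m ≤ cs.length := by omega
    have hm2 : m ≤ ds.length := by omega
    rw [List.range_succ, List.countP_append, ih hm1 hm2,
        List.take_add_one, List.take_add_one,
        List.getElem?_eq_getElem (by omega : m < cs.length),
        List.getElem?_eq_getElem (by omega : m < ds.length),
        List.zip_append (by simp [List.length_take]; omega), List.countP_append]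
    congr 1
    have hcm : PySem.List.pyGet? cs ((m : Nat) : Int) = some cs[m] := by
      rw [PySem.List.pyGet?_natCast]; exact List.getElem?_eq_getElem (by omega)
    have hdm : PySem.List.pyGet? ds ((m : Nat) : Int) = some ds[m] := by
      rw [PySem.List.pyGet?_natCast]; exact List.getElem?_eq_getElem (by omega)
    simp only [List.countP_cons, List.countP_nil, Function.comp, hcm, hdm,
      Option.toList_some, List.zip_cons_cons, List.zip_nil_right]
    by_cases e1 : cs[m] = '1' <;> by_cases e2 : ds[m] = '1' <;> simp [e1, e2] <;> tauto

theorem pvDrop_pyRange {α : Type} (xs : List α) (k : Nat) (d : α) (hk : k ≤ xs.length) :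
    (PySem.List.pyRange (k : Int) (xs.length : Int)).map (fun j => PySem.List.pyGetD xs j d)
      = xs.drop k := by
  rw [PySem.List.pyRange_one, List.map_map]
  have hsub : (((xs.length : Int) - (k : Int))).toNat = xs.length - k := by omega
  rw [hsub]
  apply List.ext_getElem
  · simp
  · intro i h1 h2
    have hi : i < xs.length - k := by simpa using h1
    simp only [List.getElem_map, List.getElem_range, Function.comp, List.getElem_drop]
    have hcast : ((k : Int) + (i : Int)) = (((k + i : Nat)) : Int) := by push_cast; ring
    rw [hcast, PySem.List.pyGetD_natCast, List.getD_eq_getElem xs d (by omega)]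

theorem pvMaxD_nonneg (t : List Int) (ht : ∀ x ∈ t, 0 ≤ x) :
    PySem.List.maxD t (fun x => x) 0 = t.foldl max 0 := by
  cases t with
  | nil => rfl
  | cons x tl =>
    have h1 : PySem.List.maxD (x :: tl) (fun y => y) 0
        = (PySem.List.max? (x :: tl) (fun y => y)).getD 0 := rfl
    rw [h1, PySem.List.max?_id_cons]
    simp only [Option.getD_some, List.foldl_cons]
    rw [max_eq_right (ht x (by simp))]

theorem pvPair (course : List String) (m0 : Nat)
    (hlen : ∀ s ∈ course, m0 ≤ s.toList.length)
    (i0 j0 : Nat) (hi : i0 < course.length) (hj : j0 < course.length) :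
    (PySem.List.pyRange 0 (m0 : Int)).foldl (fun total z =>
        if PySem.Str.pyGet? (PySem.List.pyGetD course (i0 : Int) "") z = some '1'
         ∨ PySem.Str.pyGet? (PySem.List.pyGetD course (j0 : Int) "") z = some '1'
        then total + 1 else total) (0 : Int)
      = ((PySem.Int.bitCount (PySem.Int.bor
          (PySem.List.pyGetD (course.map (fun s => pvMask (m0 : Int) s)) (i0 : Int) 0)
          (PySem.List.pyGetD (course.map (fun s => pvMask (m0 : Int) s)) (j0 : Int) 0)) : Nat) : Int) := by
  have hrowi : PySem.List.pyGetD course (i0 : Int) "" = course[i0] := by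
    rw [PySem.List.pyGetD_natCast, List.getD_eq_getElem _ _ hi]
  have hrowj : PySem.List.pyGetD course (j0 : Int) "" = course[j0] := by
    rw [PySem.List.pyGetD_natCast, List.getD_eq_getElem _ _ hj]
  have hmi : PySem.List.pyGetD (course.map (fun s => pvMask (m0 : Int) s)) (i0 : Int) 0
      = pvMask (m0 : Int) course[i0] := by
    rw [PySem.List.pyGetD_natCast, List.getD_eq_getElem _ _ (by simpa using hi), List.getElem_map]
  have hmj : PySem.List.pyGetD (course.map (fun s => pvMask (m0 : Int) s)) (j0 : Int) 0
      = pvMask (m0 : Int) course[j0] := by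
    rw [PySem.List.pyGetD_natCast, List.getD_eq_getElem _ _ (by simpa using hj), List.getElem_map]
  have hli : m0 ≤ (course[i0]).toList.length := hlen _ (List.getElem_mem hi)
  have hlj : m0 ≤ (course[j0]).toList.length := hlen _ (List.getElem_mem hj)
  have hti : ((course[i0]).toList.take m0).length = m0 := by
    rw [List.length_take]; exact Nat.min_eq_left hli
  have htj : ((course[j0]).toList.take m0).length = m0 := by
    rw [List.length_take]; exact Nat.min_eq_left hlj
  rw [hrowi, hrowj, hmi, hmj, pvMask_eq, pvMask_eq, PySem.Int.bor_natCast, pvBitCount_cast,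
    pvPop_or_count _ _ (by rw [hti, htj])]
  simp only [PySem.Str.pyGet?_eq, PySem.Chars.pyGet?_eq_listPyGet?]
  exact pvInner_count _ _ m0 hli hlj

/-- A equals the reference form on Pre_. -/
theorem pvA_ref (course : List String) (hpre : Pre_max_team course) :
    max_team course = pvRef course := by
  obtain ⟨hne, hlen0⟩ := hpre
  have hget0 : PySem.List.pyGetD course 0 "" = course.headD "" := by
    cases course with
    | nil => exact absurd rfl hne
    | cons c t => simp [PySem.List.pyGetD_zero_cons]
  simp only [max_team, pvRef]
  rw [PySem.List.len_eq, PySem.Str.len_eq]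
  set m0 : Nat := (PySem.List.pyGetD course 0 "").toList.length with hm0
  set n0 : Nat := course.length with hn0
  have hlen : ∀ s ∈ course, m0 ≤ s.toList.length := by
    intro s hs; rw [hm0, hget0]; exact hlen0 s hs
  set msk : List Int := course.map (fun s => pvMask (m0 : Int) s) with hmsk
  have hlenmsk : msk.length = n0 := by rw [hmsk, List.length_map, hn0]
  set T : List Int := (PySem.List.enumerate msk).flatMap (fun p =>
      (PySem.List.slice msk (some (p.1 + 1)) none).map
        (fun b => ((PySem.Int.bitCount (PySem.Int.bor p.2 b) : Nat) : Int))) with hT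
  -- B-side flatMap fold shape
  have hTfold : ∀ init : PySem.Dict Int Int × Int,
      T.foldl (fun st t => (st.1.modify t 0 (· + 1), max t st.2)) init
      = (PySem.List.pyRange 0 (n0 : Int)).foldl
          (fun st i => ((PySem.List.slice msk (some (i + 1)) none).map
              (fun b => ((PySem.Int.bitCount (PySem.Int.bor (PySem.List.pyGetD msk i 0) b) : Nat) : Int))).foldl
            (fun st t => (st.1.modify t 0 (· + 1), max t st.2)) st) init := by
    intro init
    rw [hT, List.foldl_flatMap, PySem.List.enumerate_eq_map_pyRange msk 0, List.foldl_map]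
    have hl : PySem.List.len msk = (n0 : Int) := by rw [PySem.List.len_eq, hlenmsk]
    rw [hl]
  -- outer congruence: A's double loop equals the B-shaped double loop
  have houter : ∀ init : PySem.Dict Int Int × Int,
      (PySem.List.pyRange 0 (n0 : Int)).foldl
        (fun st i =>
          (PySem.List.pyRange (i + 1) (n0 : Int)).foldl
            (fun st j =>
              (st.1.modify ((PySem.List.pyRange 0 (m0 : Int)).foldl (fun total z =>
                  if PySem.Str.pyGet? (PySem.List.pyGetD course i "") z = some '1'
                   ∨ PySem.Str.pyGet? (PySem.List.pyGetD course j "") z = some '1'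
                  then total + 1 else total) 0) 0 (· + 1),
               max ((PySem.List.pyRange 0 (m0 : Int)).foldl (fun total z =>
                  if PySem.Str.pyGet? (PySem.List.pyGetD course i "") z = some '1'
                   ∨ PySem.Str.pyGet? (PySem.List.pyGetD course j "") z = some '1'
                  then total + 1 else total) 0) st.2)) st) init
      = (PySem.List.pyRange 0 (n0 : Int)).foldl
          (fun st i => ((PySem.List.slice msk (some (i + 1)) none).map
              (fun b => ((PySem.Int.bitCount (PySem.Int.bor (PySem.List.pyGetD msk i 0) b) : Nat) : Int))).foldl
            (fun st t => (st.1.modify t 0 (· + 1), max t st.2)) st) init := by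
    intro init
    apply PySem.List.foldl_congr_mem'
    intro i hi st
    obtain ⟨hi0, hi1⟩ := PySem.List.mem_pyRange_one.mp hi
    obtain ⟨i0, rfl⟩ : ∃ i0 : Nat, i = (i0 : Int) := ⟨i.toNat, (Int.toNat_of_nonneg hi0).symm⟩
    have hi0n : i0 < n0 := by exact_mod_cast hi1
    have hcast : ((i0 : Int) + 1) = ((i0 + 1 : Nat) : Int) := by push_cast; ring
    rw [hcast, PySem.List.slice_from_natCast,
      ← pvDrop_pyRange msk (i0 + 1) 0 (by omega), List.map_map, List.foldl_map, hlenmsk]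
    apply PySem.List.foldl_congr_mem'
    intro j hj st'
    obtain ⟨hj0, hj1⟩ := PySem.List.mem_pyRange_one.mp hj
    obtain ⟨j0, rfl⟩ : ∃ j0 : Nat, j = (j0 : Int) := ⟨j.toNat, (Int.toNat_of_nonneg (by
      have : (0 : Int) ≤ ((i0 + 1 : Nat) : Int) := by positivity
      omega)).symm⟩
    have hj0n : j0 < n0 := by exact_mod_cast hj1
    rw [pvPair course m0 hlen i0 j0 (by omega) (by omega)]
    simp only [Function.comp, ← hmsk]
  -- nonnegativity of the totals
  have hnn : ∀ x ∈ T, 0 ≤ x := by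
    intro x hx
    rw [hT] at hx
    simp only [List.mem_flatMap, List.mem_map] at hx
    obtain ⟨p, _, b, _, rfl⟩ := hx
    positivity
  -- assemble both sides
  rw [houter, ← hTfold,
    PySem.List.foldl_prod_mk (f := fun d t => PySem.Dict.modify d t 0 (· + 1))
      (g := fun x t => max t x)]
  have hmaxc : T.foldl (fun x t => max t x) 0 = T.foldl max 0 := by
    apply PySem.List.foldl_congr_mem'
    intro x _ acc; exact max_comm x acc
  rw [hmaxc, pvMaxD_nonneg T hnn, PySem.List.count_eq,
    PySem.Dict.getD_foldl_modify_add_one]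
  simp


-- ---------- B-side: mask computation ----------

theorem pvMrec_snoc (l : List Char) (c : Char) :
    pvMrec (l ++ [c]) = pvMrec l + (if c == '1' then 2 ^ l.length else 0) := by
  induction l with
  | nil => cases hc : (c == '1') <;> simp [pvMrec, Nat.bit, hc]
  | cons d l ih =>
    simp only [List.cons_append, pvMrec, ih, Nat.bit_val, List.length_cons]
    cases hc : (c == '1') <;> simp [pow_succ] <;> try ring

theorem pvMaskB_eq (m0 : Nat) (s : String) :
    (PySem.List.pyRange 0 (m0 : Int)).foldl (fun acc z =>
        if PySem.Str.pyGet? s z = some '1' then acc + ((1 <<< z.toNat : Nat) : Int) else acc) 0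
      = ((pvMrec (s.toList.take m0) : Nat) : Int) := by
  rw [PySem.List.pyRange_zero_nat, List.foldl_map]
  induction m0 with
  | zero => simp [pvMrec]
  | succ m ih =>
    rw [List.range_succ, List.foldl_append, ih, List.foldl_cons, List.foldl_nil]
    by_cases h : m < s.toList.length
    · have hg : PySem.Str.pyGet? s ((m : Nat) : Int) = some s.toList[m] := by
        simp [PySem.Str.pyGet?_eq, PySem.Chars.pyGet?_eq_listPyGet?, PySem.List.pyGet?_natCast,
          List.getElem?_eq_getElem h]
      rw [List.take_add_one, List.getElem?_eq_getElem h]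
      simp only [Option.toList_some]
      rw [pvMrec_snoc]
      have hlen : (s.toList.take m).length = m := by
        rw [List.length_take]; omega
      have hsh : ((1 <<< ((m : Int)).toNat : Nat) : Int) = ((2 ^ m : Nat) : Int) := by
        simp [Nat.shiftLeft_eq]
      by_cases hc : s.toList[m] = '1'
      · rw [if_pos (by rw [hg, hc]), if_pos (by simp [hc]), hlen, hsh]
        push_cast; ring
      · rw [if_neg (by rw [hg]; simp [hc]), if_neg (by simp [hc])]
        simp
    · have hg : PySem.Str.pyGet? s ((m : Nat) : Int) = none := by
        simp only [PySem.Str.pyGet?_eq, PySem.Chars.pyGet?_eq_listPyGet?, PySem.List.pyGet?_natCast]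
        exact List.getElem?_eq_none (by omega)
      rw [if_neg (by rw [hg]; simp), List.take_of_length_le (by omega),
        List.take_of_length_le (by omega)]

-- ---------- B-side: the (best, ways) accumulator over weighted candidates ----------

/-- Closed form of the 'if p > best / elif p == best' accumulator over keyed, weighted candidates. -/
theorem pvBWfoldKey (f g : Int → Int) (K : List Int) : ∀ b w : Int,
    K.foldl (fun bw a =>
        if bw.1 < f a then (f a, g a)
        else if f a = bw.1 then (bw.1, bw.2 + g a) else bw) (b, w)
      = (K.foldl (fun mx a => max mx (f a)) b,
         (if K.foldl (fun mx a => max mx (f a)) b = b then w else 0)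
           + (K.map (fun a => if f a = K.foldl (fun mx a => max mx (f a)) b then g a else 0)).sum) := by
  induction K with
  | nil => intro b w; simp
  | cons a K ih =>
    intro b w
    simp only [List.foldl_cons, List.map_cons, List.sum_cons]
    rcases lt_trichotomy b (f a) with h | h | h
    · rw [if_pos h, ih (f a) (g a)]; simp only [max_eq_right h.le]
      have hpB := (PySem.List.le_foldl_max_int K f (f a)).1
      set B := K.foldl (fun mx a => max mx (f a)) (f a) with hB
      set S := (K.map (fun a => if f a = B then g a else 0)).sum with hS
      simp only [Prod.mk.injEq, true_and]
      split_ifs <;> omega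
    · rw [if_neg (by omega), if_pos h.symm, ih b (w + g a)]; simp only [max_eq_left h.ge]
      have hpB := (PySem.List.le_foldl_max_int K f b).1
      set B := K.foldl (fun mx a => max mx (f a)) b with hB
      set S := (K.map (fun a => if f a = B then g a else 0)).sum with hS
      simp only [Prod.mk.injEq, true_and]
      split_ifs <;> omega
    · rw [if_neg (not_lt.mpr h.le), if_neg (ne_of_lt h), ih b w]; simp only [max_eq_left h.le]
      have hpB := (PySem.List.le_foldl_max_int K f b).1
      set B := K.foldl (fun mx a => max mx (f a)) b with hB
      set S := (K.map (fun a => if f a = B then g a else 0)).sum with hS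
      simp only [Prod.mk.injEq, true_and]
      split_ifs <;> omega

/-- foldl max only depends on the set of elements. -/
theorem pvFoldMax_mem_eq (L1 L2 : List Int) (h : ∀ y, y ∈ L1 ↔ y ∈ L2) (b : Int) :
    L1.foldl max b = L2.foldl max b := by
  apply le_antisymm
  · rcases PySem.List.foldl_max_mem L1 b with h1 | h1
    · rw [h1]; exact (PySem.List.le_foldl_max L2 b).1
    · exact (PySem.List.le_foldl_max L2 b).2 _ ((h _).mp h1)
  · rcases PySem.List.foldl_max_mem L2 b with h1 | h1
    · rw [h1]; exact (PySem.List.le_foldl_max L1 b).1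
    · exact (PySem.List.le_foldl_max L1 b).2 _ ((h _).mpr h1)

theorem pvIndicator_sum (K : List Int) (hnd : K.Nodup) (y : Int) (hy : y ∈ K) (q : Int → Prop)
    [DecidablePred q] :
    (K.map (fun a => if q a ∧ a = y then (1 : Int) else 0)).sum = if q y then 1 else 0 := by
  induction K with
  | nil => exact absurd hy (List.not_mem_nil)
  | cons a K ih =>
    simp only [List.map_cons, List.sum_cons]
    by_cases ha : a = y
    · subst ha
      have hK : a ∉ K := (List.nodup_cons.mp hnd).1
      have hz : (K.map (fun b => if q b ∧ b = a then (1 : Int) else 0)).sum = 0 := by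
        apply List.sum_eq_zero
        intro t ht
        obtain ⟨b, hb, rfl⟩ := List.mem_map.mp ht
        rw [if_neg]
        rintro ⟨-, rfl⟩
        exact hK hb
      rw [hz]
      by_cases hq : q a
      · rw [if_pos ⟨hq, rfl⟩, if_pos hq]; ring
      · rw [if_neg (fun hc => hq hc.1), if_neg hq]; ring
    · have hy' : y ∈ K := by
        rcases List.mem_cons.mp hy with h | h
        · exact absurd h.symm ha
        · exact h
      rw [ih (List.nodup_cons.mp hnd).2 hy', if_neg (fun hc => ha hc.2)]
      ring

theorem pvSum_countP (K : List Int) (hnd : K.Nodup) (f : Int → Int) (v : Int) :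
    ∀ (prev : List Int), (∀ y ∈ prev, y ∈ K) →
    (K.map (fun a => if f a = v then (prev.count a : Int) else 0)).sum
      = ((prev.countP (fun a => decide (f a = v)) : Nat) : Int) := by
  intro prev hsub
  induction prev with
  | nil =>
    simp only [List.countP_nil, Nat.cast_zero]
    apply List.sum_eq_zero
    intro t ht
    obtain ⟨b, hb, rfl⟩ := List.mem_map.mp ht
    simp
  | cons y prev ih =>
    have hyK : y ∈ K := hsub y List.mem_cons_self
    have hsub' : ∀ z ∈ prev, z ∈ K := fun z hz => hsub z (List.mem_cons_of_mem _ hz)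
    have hpt : (fun a => if f a = v then ((y :: prev).count a : Int) else 0)
        = (fun a => (if f a = v then (prev.count a : Int) else 0)
            + (if f a = v ∧ a = y then (1 : Int) else 0)) := by
      funext a
      rw [List.count_cons]
      rcases eq_or_ne a y with hay | hay <;> by_cases hf : f a = v <;>
        simp_all <;> push_cast <;> try ring
      omega
    rw [hpt, PySem.List.sum_map_add_int, ih hsub',
      pvIndicator_sum K hnd y hyK (fun a => f a = v), List.countP_cons]
    by_cases hf : f y = v
    · rw [if_pos hf, if_pos (by simp [hf])]; push_cast; ring
    · rw [if_neg hf, if_neg (by simp [hf])]; push_cast; ring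

-- ---------- B-side: the one-pass fold over rows ----------

/-- One row against the Counter of previous masks: closed form of the inner items-fold. -/
theorem pvRowStep (x : Int) (prev : List Int) (b w : Int) :
    ((PySem.Dict.counter prev).items.foldl (fun bw ak =>
        let p : Int := ((PySem.Int.bitCount (PySem.Int.bor x ak.1) : Nat) : Int)
        if bw.1 < p then (p, ak.2)
        else if p = bw.1 then (bw.1, bw.2 + ak.2) else bw) (b, w))
    = ((prev.map (fun a => pvP x a)).foldl max b,
       (if (prev.map (fun a => pvP x a)).foldl max b = b then w else 0)
         + (((prev.map (fun a => pvP x a)).count ((prev.map (fun a => pvP x a)).foldl max b) : Nat) : Int)) := by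
  rw [PySem.Dict.items_counter]
  have h0 : ((PySem.Set.ofList prev).map (fun k => (k, (List.count k prev : Int)))).foldl
      (fun bw ak =>
        let p : Int := ((PySem.Int.bitCount (PySem.Int.bor x ak.1) : Nat) : Int)
        if bw.1 < p then (p, ak.2)
        else if p = bw.1 then (bw.1, bw.2 + ak.2) else bw) (b, w)
    = (PySem.Set.ofList prev).foldl
      (fun bw a => if bw.1 < pvP x a then (pvP x a, (List.count a prev : Int))
        else if pvP x a = bw.1 then (bw.1, bw.2 + (List.count a prev : Int)) else bw) (b, w) :=
    List.foldl_map
  rw [h0, pvBWfoldKey (fun a => pvP x a) (fun a => (List.count a prev : Int)) (PySem.Set.ofList prev) b w]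
  have hmax : (PySem.Set.ofList prev).foldl (fun mx a => max mx (pvP x a)) b
      = (prev.map (fun a => pvP x a)).foldl max b := by
    have h1 : ((PySem.Set.ofList prev).map (fun a => pvP x a)).foldl max b
        = (PySem.Set.ofList prev).foldl (fun mx a => max mx (pvP x a)) b := List.foldl_map
    rw [← h1]
    apply pvFoldMax_mem_eq
    intro y
    simp only [List.mem_map]
    constructor
    · rintro ⟨a, ha, rfl⟩; exact ⟨a, (PySem.Set.mem_ofList prev a).mp ha, rfl⟩
    · rintro ⟨a, ha, rfl⟩; exact ⟨a, (PySem.Set.mem_ofList prev a).mpr ha, rfl⟩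
  simp only [hmax]
  set B : Int := (prev.map (fun a => pvP x a)).foldl max b with hB
  have hsum : ((PySem.Set.ofList prev).map (fun a => if pvP x a = B then (List.count a prev : Int) else 0)).sum
      = (((prev.map (fun a => pvP x a)).count B : Nat) : Int) := by
    rw [pvSum_countP (PySem.Set.ofList prev) (PySem.Set.nodup_ofList prev)
        (fun a => pvP x a) B prev (fun y hy => (PySem.Set.mem_ofList prev y).mpr hy)]
    congr 1
    simp only [List.count, List.countP_map]
    rfl
  rw [hsum]

/-- Backward pair totals: each mask paired with all masks before it. -/
def pvTB (prev : List Int) : List Int → List Int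
  | [] => []
  | x :: xs => prev.map (fun a => pvP x a) ++ pvTB (prev ++ [x]) xs

/-- Composing two stages of the (best, ways) accumulator. -/
theorem pvComposeW (L1 L2 : List Int) (b w : Int) :
    (if L2.foldl max (L1.foldl max b) = L1.foldl max b then
        (if L1.foldl max b = b then w else 0) + ((L1.count (L1.foldl max b) : Nat) : Int) else 0)
      + ((L2.count (L2.foldl max (L1.foldl max b)) : Nat) : Int)
    = (if L2.foldl max (L1.foldl max b) = b then w else 0)
      + (((L1 ++ L2).count (L2.foldl max (L1.foldl max b)) : Nat) : Int) := by
  set B1 : Int := L1.foldl max b with hB1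
  set B2 : Int := L2.foldl max B1 with hB2
  rw [List.count_append]
  by_cases hE : B2 = B1
  · rw [if_pos hE]
    simp only [hE]
    push_cast; ring
  · have h1 : B1 ≤ B2 := by rw [hB2]; exact (PySem.List.le_foldl_max L2 B1).1
    have h2 : b ≤ B1 := by rw [hB1]; exact (PySem.List.le_foldl_max L1 b).1
    have hc0 : L1.count B2 = 0 := by
      rw [List.count_eq_zero]
      intro hmem
      have := (PySem.List.le_foldl_max L1 b).2 _ hmem
      rw [← hB1] at this
      omega
    rw [if_neg hE, if_neg (by omega : ¬ B2 = b), hc0]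
    push_cast; ring

theorem pvFoldB (m : Int) (ss : List String) : ∀ (prev : List Int) (b w : Int),
    ss.foldl (fun st s =>
      let x : Int :=
        (PySem.List.pyRange 0 m).foldl (fun acc z =>
          if PySem.Str.pyGet? s z = some '1' then acc + ((1 <<< z.toNat : Nat) : Int) else acc) 0
      let bw : Int × Int :=
        st.2.2.items.foldl (fun bw ak =>
          let p : Int := ((PySem.Int.bitCount (PySem.Int.bor x ak.1) : Nat) : Int)
          if bw.1 < p then (p, ak.2)
          else if p = bw.1 then (bw.1, bw.2 + ak.2) else bw)
          (st.1, st.2.1)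
      (bw.1, bw.2, st.2.2.modify x 0 (· + 1)))
      (b, w, PySem.Dict.counter prev)
    = ((pvTB prev (ss.map (fun s =>
          (PySem.List.pyRange 0 m).foldl (fun acc z =>
            if PySem.Str.pyGet? s z = some '1' then acc + ((1 <<< z.toNat : Nat) : Int) else acc) 0))).foldl max b,
       (if (pvTB prev (ss.map (fun s =>
          (PySem.List.pyRange 0 m).foldl (fun acc z =>
            if PySem.Str.pyGet? s z = some '1' then acc + ((1 <<< z.toNat : Nat) : Int) else acc) 0))).foldl max b = b then w else 0)
         + ((pvTB prev (ss.map (fun s =>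
            (PySem.List.pyRange 0 m).foldl (fun acc z =>
              if PySem.Str.pyGet? s z = some '1' then acc + ((1 <<< z.toNat : Nat) : Int) else acc) 0))).count
            ((pvTB prev (ss.map (fun s =>
              (PySem.List.pyRange 0 m).foldl (fun acc z =>
                if PySem.Str.pyGet? s z = some '1' then acc + ((1 <<< z.toNat : Nat) : Int) else acc) 0))).foldl max b) : Nat),
       PySem.Dict.counter (prev ++ ss.map (fun s =>
          (PySem.List.pyRange 0 m).foldl (fun acc z =>
            if PySem.Str.pyGet? s z = some '1' then acc + ((1 <<< z.toNat : Nat) : Int) else acc) 0))) := by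
  induction ss with
  | nil => intro prev b w; simp [pvTB]
  | cons s ss ih =>
    intro prev b w
    simp only [List.foldl_cons, List.map_cons]
    rw [pvRowStep, ← PySem.Dict.counter_append_singleton, ih]
    simp only [pvTB, List.foldl_append, List.append_assoc, List.singleton_append,
      Prod.mk.injEq]
    refine ⟨trivial, ?_, trivial⟩
    exact pvComposeW _ _ b w

/-- Forward pair totals (the reference order). -/
def pvT (ms : List Int) : List Int :=
  (PySem.List.enumerate ms).flatMap (fun p =>
    (PySem.List.slice ms (some (p.1 + 1)) none).map (fun b => pvP p.2 b))

theorem pvP_comm (a b : Int) : pvP a b = pvP b a := by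
  unfold pvP; rw [PySem.Int.bor_comm]

theorem pvTB_snoc (xs : List Int) : ∀ (prev : List Int) (x : Int),
    pvTB prev (xs ++ [x]) = pvTB prev xs ++ (prev ++ xs).map (fun a => pvP x a) := by
  induction xs with
  | nil => intro prev x; simp [pvTB]
  | cons y xs ih =>
    intro prev x
    simp only [List.cons_append, pvTB, ih, List.append_assoc, List.nil_append]

theorem pvInterleave {α : Type} (E : List α) (f : α → List Int) (c : α → Int) :
    (E.flatMap (fun p => f p ++ [c p])).Perm (E.flatMap f ++ E.map c) := by
  induction E with
  | nil => simp
  | cons a E ih =>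
    simp only [List.flatMap_cons, List.map_cons]
    have e1 : (f a ++ [c a]) ++ E.flatMap (fun p => f p ++ [c p])
        = f a ++ (c a :: E.flatMap (fun p => f p ++ [c p])) := by
      rw [List.append_assoc]; rfl
    have e2 : (f a ++ E.flatMap f) ++ (c a :: E.map c)
        = f a ++ (E.flatMap f ++ c a :: E.map c) := by
      rw [List.append_assoc]
    rw [e1, e2]
    apply List.Perm.append_left
    exact List.Perm.trans (List.Perm.cons _ ih) List.perm_middle.symm

theorem pvT_snoc (ms : List Int) (x : Int) :
    (pvT (ms ++ [x])).Perm (pvT ms ++ ms.map (fun a => pvP a x)) := by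
  unfold pvT
  rw [PySem.List.enumerate_append, List.flatMap_append]
  have h2 : (PySem.List.enumerate [x] (0 + (ms.length : Int))).flatMap
      (fun p => (PySem.List.slice (ms ++ [x]) (some (p.1 + 1)) none).map (fun b => pvP p.2 b)) = [] := by
    simp only [PySem.List.enumerate_cons, PySem.List.enumerate_nil, List.flatMap_cons,
      List.flatMap_nil, List.append_nil]
    have hc : (0 : Int) + (ms.length : Int) + 1 = ((ms.length + 1 : Nat) : Int) := by push_cast; ring
    rw [hc, PySem.List.slice_from_natCast, List.drop_of_length_le (by simp)]
    rfl
  have h1 : (PySem.List.enumerate ms 0).flatMap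
      (fun p => (PySem.List.slice (ms ++ [x]) (some (p.1 + 1)) none).map (fun b => pvP p.2 b))
      = (PySem.List.enumerate ms 0).flatMap
        (fun p => ((PySem.List.slice ms (some (p.1 + 1)) none).map (fun b => pvP p.2 b)) ++ [pvP p.2 x]) := by
    apply List.flatMap_congr
    intro p hp
    obtain ⟨k, hk, rfl⟩ := (PySem.List.mem_enumerate_iff ms 0 p).mp hp
    dsimp only
    have hc : (0 : Int) + (k : Int) + 1 = ((k + 1 : Nat) : Int) := by push_cast; ring
    rw [hc, PySem.List.slice_from_natCast, PySem.List.slice_from_natCast,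
      List.drop_append_of_le_length (by omega : k + 1 ≤ ms.length), List.map_append]
    rfl
  rw [h2, h1, List.append_nil]
  refine (pvInterleave _ _ _).trans ?_
  have h3 : (PySem.List.enumerate ms 0).map (fun p => pvP p.2 x) = ms.map (fun a => pvP a x) := by
    rw [show (fun p : Int × Int => pvP p.2 x) = (fun a : Int => pvP a x) ∘ (fun p : Int × Int => p.2) from rfl,
      ← List.map_map, PySem.List.map_snd_enumerate]
  rw [h3]

theorem pvPerm (ms : List Int) : (pvT ms).Perm (pvTB [] ms) := by
  induction ms using List.reverseRecOn with
  | nil => simp [pvT, pvTB, PySem.List.enumerate_nil]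
  | append_singleton ms x ih =>
    refine (pvT_snoc ms x).trans ?_
    rw [pvTB_snoc, List.nil_append]
    have hmc : ms.map (fun a => pvP a x) = ms.map (fun a => pvP x a) :=
      List.map_congr_left (fun a _ => pvP_comm a x)
    rw [hmc]
    exact List.Perm.append_right _ ih

-- ---------- B equals the reference form ----------

theorem pvB_ref (course : List String) : max_team_alt course = pvRef course := by
  simp only [max_team_alt, pvRef]
  rw [PySem.Str.len_eq]
  set m0 : Nat := (PySem.List.pyGetD course 0 "").toList.length with hm0
  have hstart : ((0 : Int), (0 : Int), (PySem.Dict.empty : PySem.Dict Int Int))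
      = ((0 : Int), (0 : Int), PySem.Dict.counter ([] : List Int)) := rfl
  rw [hstart, pvFoldB ((m0 : Nat) : Int) course [] 0 0]
  have hmsk : course.map (fun s => (PySem.List.pyRange 0 ((m0 : Nat) : Int)).foldl (fun acc z =>
        if PySem.Str.pyGet? s z = some '1' then acc + ((1 <<< z.toNat : Nat) : Int) else acc) 0)
      = course.map (fun s => pvMask ((m0 : Nat) : Int) s) := by
    apply List.map_congr_left
    intro s _
    rw [pvMaskB_eq, pvMask_eq]
  simp only [hmsk]
  set msk : List Int := course.map (fun s => pvMask ((m0 : Nat) : Int) s) with hmskdef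
  set TB : List Int := pvTB [] msk with hTBdef
  have hTT : (PySem.List.enumerate msk).flatMap (fun p =>
      (PySem.List.slice msk (some (p.1 + 1)) none).map
        (fun b => (PySem.Int.bitCount (PySem.Int.bor p.2 b) : Int))) = pvT msk := rfl
  simp only [hTT]
  set T : List Int := pvT msk with hTdef
  have hperm : T.Perm TB := pvPerm msk
  have hnn : ∀ y ∈ T, 0 ≤ y := by
    intro y hy
    rw [hTdef] at hy
    unfold pvT at hy
    simp only [List.mem_flatMap, List.mem_map] at hy
    obtain ⟨p, _, b, _, rfl⟩ := hy
    unfold pvP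
    positivity
  have hmax0 : PySem.List.maxD T (fun x => x) 0 = T.foldl max 0 := pvMaxD_nonneg T hnn
  have hfold : TB.foldl max 0 = T.foldl max 0 :=
    pvFoldMax_mem_eq TB T (fun y => (hperm.mem_iff).symm) 0
  simp only [hmax0, hfold, ite_self, zero_add, PySem.List.count_eq]
  refine Prod.ext rfl ?_
  show ((TB.count (T.foldl max 0) : Nat) : Int) = ((List.count (T.foldl max 0) T : Nat) : Int)
  rw [show TB.count (T.foldl max 0) = List.count (T.foldl max 0) TB from rfl, hperm.count_eq]

-- ===== VERDICT (by name: the statement is the Claim_ definition above) =====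
theorem max_team_spec : Claim_equal_max_team := by
  intro course _ hpre
  show max_team course = max_team_alt course
  rw [pvA_ref course hpre, pvB_ref course]
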